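-- pv_equiv track=rewrite | github.com/IlmaJaganjac/abn-rag | backend/app/extraction_page_scanner.py | _expand_with_context
-- ===== SOURCE A (Python) =====
-- def _expand_with_context(pages: list[int], context: int, all_pages: set[int]) -> list[int]:
--     expanded: set[int] = set()
--     for p in pages:
--         for delta in range(-context, context + 1):
--             candidate = p + delta
--             if candidate in all_pages:
--                 expanded.add(candidate)
--     return sorted(expanded)
-- ===== SOURCE B (Python) =====
-- def _expand_with_context(pages: list[int], context: int, all_pages: set[int]) -> list[int]:
--     ps = sorted(pages)
--     result: list[int] = []
--     i = 0
--     for x in sorted(set(all_pages)):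
--         while i < len(ps) and ps[i] < x - context:
--             i += 1
--         if i < len(ps) and ps[i] <= x + context:
--             result.append(x)
--     return result
-- ===== Notes on version B (the rewrite author's own statement) =====
-- stated objective: faster
-- what changed: Instead of enumerating every offset in [-context, context] for each page and probing set membership, B sorts the page universe once and keeps each page of it that lies inside some closed interval [p-context, p+context], eliminating the per-delta candidate enumeration and the result set.
import Mathlib
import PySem

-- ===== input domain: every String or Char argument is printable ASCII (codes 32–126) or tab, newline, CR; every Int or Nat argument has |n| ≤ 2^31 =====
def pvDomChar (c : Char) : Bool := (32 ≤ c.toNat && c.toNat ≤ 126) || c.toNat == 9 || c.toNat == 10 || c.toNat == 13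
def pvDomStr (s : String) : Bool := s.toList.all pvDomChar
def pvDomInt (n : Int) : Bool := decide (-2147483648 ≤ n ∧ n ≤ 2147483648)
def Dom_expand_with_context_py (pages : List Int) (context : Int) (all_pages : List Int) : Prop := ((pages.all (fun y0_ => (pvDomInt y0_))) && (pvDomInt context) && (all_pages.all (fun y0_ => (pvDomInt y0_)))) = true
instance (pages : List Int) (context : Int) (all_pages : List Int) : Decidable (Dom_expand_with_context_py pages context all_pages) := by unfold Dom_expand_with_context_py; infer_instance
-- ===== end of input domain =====

-- B replaces A's per-page enumeration of all offsets in [-context, context] (with a membership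
-- probe per candidate and a final sort of the collected set) by sorting pages and the page
-- universe once and sweeping both with a monotone pointer: a universe page x is kept iff the
-- first page ≥ x - context is ≤ x + context.

-- ===== PORT A =====
def expand_with_context_py (pages : List Int) (context : Int) (all_pages : List Int) : List Int :=
  let expanded : PySem.Set Int :=
    pages.foldl (fun expanded p =>
      (PySem.List.pyRange (-context) (context + 1) 1).foldl (fun expanded delta =>
        let candidate := p + delta
        if all_pages.contains candidate then PySem.Set.add expanded candidate else expanded)
        expanded)
      PySem.Set.empty
  PySem.List.sorted expanded (fun x => x) false

-- ===== PORT B =====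
-- the inner 'while i < len(ps) and ps[i] < bound: i += 1' loop
def pvAdvance (ps : List Int) (bound : Int) (i : Nat) : Nat :=
  if h : i < ps.length then
    if ps[i] < bound then pvAdvance ps bound (i + 1) else i
  else i
termination_by ps.length - i

def expand_with_context_py_alt (pages : List Int) (context : Int) (all_pages : List Int) : List Int :=
  let ps := PySem.List.sorted pages (fun x => x) false
  ((PySem.List.sorted (PySem.Set.ofList all_pages) (fun x => x) false).foldl
    (fun (st : Nat × List Int) x =>
      let i := pvAdvance ps (x - context) st.1
      if h : i < ps.length then
        if ps[i] ≤ x + context then (i, st.2 ++ [x]) else (i, st.2)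
      else (i, st.2))
    (0, [])).2

-- ===== PRECONDITION & SPEC =====
def Spec_expand_with_context_py (pages : List Int) (context : Int) (all_pages : List Int) (out : List Int) : Prop := out = expand_with_context_py_alt pages context all_pages
instance (pages : List Int) (context : Int) (all_pages : List Int) (out : List Int) : Decidable (Spec_expand_with_context_py pages context all_pages out) := by unfold Spec_expand_with_context_py; infer_instance

-- ===== CLAIM (what is proved, stated in full; the proofs are below) =====
def Claim_equal_expand_with_context_py : Prop := ∀ (pages : List Int) (context : Int) (all_pages : List Int), Dom_expand_with_context_py pages context all_pages → Spec_expand_with_context_py pages context all_pages (expand_with_context_py pages context all_pages)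

-- ===== LEMMAS AND PROOFS =====

-- membership in A's inner (delta) fold, for an arbitrary delta list
theorem pv_inner_mem (all_pages : List Int) (p : Int) (L : List Int) (s : PySem.Set Int) (x : Int) :
    x ∈ L.foldl (fun acc delta =>
        if all_pages.contains (p + delta) then PySem.Set.add acc (p + delta) else acc) s ↔
      x ∈ s ∨ (x ∈ all_pages ∧ ∃ d ∈ L, x = p + d) := by
  induction L generalizing s with
  | nil => simp
  | cons d t ih =>
    simp only [List.foldl_cons]
    by_cases hc : all_pages.contains (p + d)
    · simp only [hc, if_pos, ih, PySem.Set.mem_add]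
      constructor
      · rintro ((h | rfl) | ⟨hx, d', hd', rfl⟩)
        · exact Or.inl h
        · exact Or.inr ⟨by simpa using hc, d, List.mem_cons_self, rfl⟩
        · exact Or.inr ⟨hx, d', List.mem_cons_of_mem _ hd', rfl⟩
      · rintro (h | ⟨hx, d', hd', rfl⟩)
        · exact Or.inl (Or.inl h)
        · rcases List.mem_cons.mp hd' with rfl | hd''
          · exact Or.inl (Or.inr rfl)
          · exact Or.inr ⟨hx, d', hd'', rfl⟩
    · simp only [hc, ih]
      constructor
      · rintro (h | ⟨hx, d', hd', rfl⟩)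
        · exact Or.inl h
        · exact Or.inr ⟨hx, d', List.mem_cons_of_mem _ hd', rfl⟩
      · rintro (h | ⟨hx, d', hd', rfl⟩)
        · exact Or.inl h
        · rcases List.mem_cons.mp hd' with rfl | hd''
          · exact absurd (by simpa using hx) (by simpa using hc)
          · exact Or.inr ⟨hx, d', hd'', rfl⟩

-- membership in A's full accumulation
theorem pv_outer_mem (pages : List Int) (context : Int) (all_pages : List Int)
    (s : PySem.Set Int) (x : Int) :
    x ∈ pages.foldl (fun acc p =>
        (PySem.List.pyRange (-context) (context + 1) 1).foldl (fun acc delta =>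
          if all_pages.contains (p + delta) then PySem.Set.add acc (p + delta) else acc) acc) s ↔
      x ∈ s ∨ (x ∈ all_pages ∧ ∃ p ∈ pages, p - context ≤ x ∧ x ≤ p + context) := by
  induction pages generalizing s with
  | nil => simp
  | cons p t ih =>
    simp only [List.foldl_cons, ih, pv_inner_mem, PySem.List.mem_pyRange_one]
    constructor
    · rintro ((h | ⟨hx, d, ⟨hd1, hd2⟩, rfl⟩) | ⟨hx, p', hp', h1, h2⟩)
      · exact Or.inl h
      · exact Or.inr ⟨hx, p, List.mem_cons_self, by omega⟩
      · exact Or.inr ⟨hx, p', List.mem_cons_of_mem _ hp', h1, h2⟩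
    · rintro (h | ⟨hx, p', hp', h1, h2⟩)
      · exact Or.inl (Or.inl h)
      · rcases List.mem_cons.mp hp' with rfl | hp''
        · exact Or.inl (Or.inr ⟨hx, x - p', ⟨by omega, by omega⟩, by omega⟩)
        · exact Or.inr ⟨hx, p', hp'', h1, h2⟩

-- A's accumulated set stays Nodup
theorem pv_nodup_fold (pages : List Int) (context : Int) (all_pages : List Int)
    (s : PySem.Set Int) (hs : s.Nodup) :
    (pages.foldl (fun acc p =>
        (PySem.List.pyRange (-context) (context + 1) 1).foldl (fun acc delta =>
          if all_pages.contains (p + delta) then PySem.Set.add acc (p + delta) else acc) acc) s).Nodup := by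
  induction pages generalizing s with
  | nil => exact hs
  | cons p t ih =>
    simp only [List.foldl_cons]
    apply ih
    induction PySem.List.pyRange (-context) (context + 1) 1 generalizing s with
    | nil => exact hs
    | cons d t' ih' =>
      simp only [List.foldl_cons]
      apply ih'
      split
      · exact PySem.Set.nodup_add _ _ hs
      · exact hs

-- every index pvAdvance skipped holds a value below the bound
theorem pvAdvance_skipped (ps : List Int) (b : Int) (i : Nat) :
    ∀ j (hj : j < ps.length), i ≤ j → j < pvAdvance ps b i → ps[j] < b := by
  fun_induction pvAdvance ps b i with
  | case1 i h hlt ih =>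
    intro j hj h1 h2
    rcases Nat.eq_or_lt_of_le h1 with rfl | h1'
    · exact hlt
    · exact ih j hj h1' h2
  | case2 i h hlt => intro j hj h1 h2; omega
  | case3 i h => intro j hj h1 h2; omega

-- where pvAdvance stops, the value is not below the bound
theorem pvAdvance_stop (ps : List Int) (b : Int) (i : Nat)
    (h : pvAdvance ps b i < ps.length) : ¬ ps[pvAdvance ps b i] < b := by
  fun_induction pvAdvance ps b i with
  | case1 i hi hlt ih => exact ih h
  | case2 i hi hlt => exact hlt
  | case3 i hi => omega

-- the two-pointer sweep computes the filter by interval membership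
theorem pv_sweep (ps : List Int) (c : Int)
    (hmono : ∀ (p q : Nat) (hp : p < ps.length) (hq : q < ps.length), p ≤ q → ps[p] ≤ ps[q])
    (S : List Int) (hS : S.Pairwise (· ≤ ·)) :
    ∀ (i : Nat) (acc : List Int),
    (∀ x ∈ S, ∀ j (hj : j < ps.length), j < i → ps[j] < x - c) →
    (S.foldl (fun (st : Nat × List Int) x =>
        let i' := pvAdvance ps (x - c) st.1
        if h : i' < ps.length then
          if ps[i'] ≤ x + c then (i', st.2 ++ [x]) else (i', st.2)
        else (i', st.2)) (i, acc)).2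
      = acc ++ S.filter (fun x => ps.any (fun p => decide (p - c ≤ x ∧ x ≤ p + c))) := by
  induction S with
  | nil => intro i acc _; simp
  | cons x t ih =>
    intro i acc Hdrop
    rcases List.pairwise_cons.mp hS with ⟨hx_le, ht⟩
    have hHdrop' : ∀ y ∈ t, ∀ j (hj : j < ps.length), j < pvAdvance ps (x - c) i → ps[j] < y - c := by
      intro y hy j hj hji
      have hxy : x ≤ y := hx_le y hy
      by_cases hji' : j < i
      · have := Hdrop y (List.mem_cons_of_mem _ hy) j hj hji'; omega
      · have := pvAdvance_skipped ps (x - c) i j hj (by omega) hji; omega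
    have hpred : (ps.any (fun p => decide (p - c ≤ x ∧ x ≤ p + c)) = true) ↔
        (∃ h' : pvAdvance ps (x - c) i < ps.length, ps[pvAdvance ps (x - c) i] ≤ x + c) := by
      constructor
      · rintro hany
        rcases List.any_eq_true.mp hany with ⟨p, hp, hcov⟩
        rcases List.mem_iff_getElem.mp hp with ⟨k, hk, rfl⟩
        simp only [decide_eq_true_eq] at hcov
        have hk_ge : pvAdvance ps (x - c) i ≤ k := by
          by_contra hlt
          rw [Nat.not_le] at hlt
          by_cases hki : k < i
          · have := Hdrop x List.mem_cons_self k hk hki; omega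
          · have := pvAdvance_skipped ps (x - c) i k hk (by omega) hlt; omega
        have h' : pvAdvance ps (x - c) i < ps.length := lt_of_le_of_lt hk_ge hk
        exact ⟨h', le_trans (hmono _ k h' hk hk_ge) (by omega)⟩
      · rintro ⟨h', hle⟩
        have hstop := pvAdvance_stop ps (x - c) i h'
        exact List.any_eq_true.mpr ⟨ps[pvAdvance ps (x - c) i],
          List.getElem_mem h', by simp only [decide_eq_true_eq]; omega⟩
    simp only [List.foldl_cons, List.filter_cons]
    by_cases hem : ps.any (fun p => decide (p - c ≤ x ∧ x ≤ p + c)) = true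
    · rcases hpred.mp hem with ⟨h', hle⟩
      simp only [h', hle, dif_pos, if_pos, hem]
      rw [ih ht _ _ hHdrop']
      simp
    · have hno : ¬ ∃ h' : pvAdvance ps (x - c) i < ps.length, ps[pvAdvance ps (x - c) i] ≤ x + c :=
        fun h => hem (hpred.mpr h)
      have hstep : (if h : pvAdvance ps (x - c) i < ps.length then
          if ps[pvAdvance ps (x - c) i] ≤ x + c then (pvAdvance ps (x - c) i, acc ++ [x])
          else (pvAdvance ps (x - c) i, acc)
        else (pvAdvance ps (x - c) i, acc)) = (pvAdvance ps (x - c) i, acc) := by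
        split
        · rename_i h'
          rw [if_neg (fun hle => hno ⟨h', hle⟩)]
        · rfl
      simp only [hem, if_neg, Bool.false_eq_true, not_false_iff]
      simp only [hstep]
      exact ih ht _ _ hHdrop'

-- ===== VERDICT (by name: the statement is the Claim_ definition above) =====
theorem expand_with_context_py_spec : Claim_equal_expand_with_context_py := by
  intro pages context all_pages _
  unfold Spec_expand_with_context_py expand_with_context_py expand_with_context_py_alt
  set ps := PySem.List.sorted pages (fun x => x) false with hps
  set S := PySem.List.sorted (PySem.Set.ofList all_pages) (fun x => x) false with hS
  have hSlt : S.Pairwise (· < ·) := PySem.List.sorted_ofList_pairwise_lt all_pages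
  rw [pv_sweep ps context
      (fun p q hp hq hpq => PySem.List.sorted_id_getElem_mono pages hpq hq)
      S (hSlt.imp le_of_lt) 0 [] (fun _ _ j _ hj => by omega)]
  simp only [List.nil_append]
  have hfc : S.filter (fun x => ps.any (fun p => decide (p - context ≤ x ∧ x ≤ p + context)))
      = S.filter (fun x => pages.any (fun p => decide (p - context ≤ x ∧ x ≤ p + context))) := by
    apply List.filter_congr
    intro x _
    exact (PySem.List.sorted_perm pages (fun x => x) false).any_eq
  rw [hfc]
  set pred : Int → Bool := fun x => pages.any (fun p => decide (p - context ≤ x ∧ x ≤ p + context)) with hpred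
  have hSnodup : S.Nodup := (PySem.List.sorted_perm _ _ _).nodup_iff.mpr (PySem.Set.nodup_ofList all_pages)
  have hFnodup : (S.filter pred).Nodup := hSnodup.filter _
  have hAnodup := pv_nodup_fold pages context all_pages PySem.Set.empty List.nodup_nil
  have hmem : ∀ x, x ∈ S.filter pred ↔
      x ∈ pages.foldl (fun acc p =>
        (PySem.List.pyRange (-context) (context + 1) 1).foldl (fun acc delta =>
          if all_pages.contains (p + delta) then PySem.Set.add acc (p + delta) else acc) acc)
        PySem.Set.empty := by
    intro x
    rw [pv_outer_mem]
    simp only [List.mem_filter, hS, PySem.List.mem_sorted, PySem.Set.mem_ofList, hpred,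
      List.any_eq_true, decide_eq_true_eq, PySem.Set.empty]
    constructor
    · rintro ⟨hx, p, hp, h1, h2⟩
      exact Or.inr ⟨hx, p, hp, h1, h2⟩
    · rintro (h | ⟨hx, p, hp, h1, h2⟩)
      · simp at h
      · exact ⟨hx, p, hp, h1, h2⟩
  have hperm : (S.filter pred).Perm _ := (List.perm_ext_iff_of_nodup hFnodup hAnodup).mpr hmem
  exact PySem.List.sorted_eq_of_perm_of_pairwise_lt _ _ (fun x => x) hperm (hSlt.filter pred)
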